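-- pv_equiv track=rewrite | github.com/innakysarat/algorithms | main.py | get_level_order_keys_and_levels
-- ===== SOURCE A (Python) =====
-- import queue
--
-- class TreeNode:
--
--     def __init__(self, key: int, level=0):
--         self.key = key
--         self.left = None
--         self.right = None
--         #self.parent = parent
--         self.level = level
--
-- def get_pre_ind():
--     return build_tree.pre_index
--
-- def inc_pre_ind():
--     build_tree.pre_index += 1
--
-- def build_tree(pre: list, index: int, low: int, high: int):
--
--     if low > high:
--         return None
--
--     root = TreeNode(key=pre[get_pre_ind()], level=index)
--     inc_pre_ind()
--
--     if low == high:
--         return root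
--
--     r_child_ind = -1
--     for i in range(low, high+1):
--         if pre[i] > root.key:
--             r_child_ind = i
--             break
--
--     if r_child_ind == -1:
--         r_child_ind = get_pre_ind() + (high - low)
--
--     root.left = build_tree(pre, index+1, get_pre_ind(), r_child_ind-1)
--     root.right = build_tree(pre, index+1, r_child_ind, high)
--
--     return root
--
-- def get_level_order_keys_and_levels(preorder_keys: list):
--     build_tree.pre_index = 0
--     root = build_tree(preorder_keys, 0, 0, len(preorder_keys) - 1)
--
--     keys = list()
--     levels = list()
--     q = queue.Queue()
--
--     q.put(root)
--     while not q.empty():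
--         current = q.get()
--         keys.append(current.key)
--         levels.append(current.level)
--         if current.left is not None:
--             q.put(current.left)
--         if current.right is not None:
--             q.put(current.right)
--
--     return keys, levels
-- ===== SOURCE B (Python) =====
-- # B: pure functional rebuild — split the tail at the first key greater than the head
-- # (left subtree = prefix, right subtree = suffix), then walk the tree one whole
-- # level at a time instead of a node-by-node FIFO queue.
-- def get_level_order_keys_and_levels(preorder_keys: list):
--     def build(seg):
--         if not seg:
--             return None
--         key, rest = seg[0], seg[1:]
--         cut = next((j for j, v in enumerate(rest) if v > key), len(rest))
--         return (key, build(rest[:cut]), build(rest[cut:]))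
--
--     keys, levels = [], []
--     level = 0
--     frontier = [t for t in [build(preorder_keys)] if t]
--     while frontier:
--         for key, _, _ in frontier:
--             keys.append(key)
--             levels.append(level)
--         frontier = [c for t in frontier for c in (t[1], t[2]) if c]
--         level += 1
--     return keys, levels
-- ===== Notes on version B (the rewrite author's own statement) =====
-- stated objective: alternative
-- what changed: A rebuilds the BST with a global mutable preorder index, index-range recursion and a sentinel linear scan, then does FIFO-queue BFS over nodes carrying a stored level; B rebuilds it purely by splitting the tail sublist at the first key greater than the head and emits the output one whole level (frontier list) at a time with a level counter, no queue and no stored levels.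
import Mathlib
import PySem

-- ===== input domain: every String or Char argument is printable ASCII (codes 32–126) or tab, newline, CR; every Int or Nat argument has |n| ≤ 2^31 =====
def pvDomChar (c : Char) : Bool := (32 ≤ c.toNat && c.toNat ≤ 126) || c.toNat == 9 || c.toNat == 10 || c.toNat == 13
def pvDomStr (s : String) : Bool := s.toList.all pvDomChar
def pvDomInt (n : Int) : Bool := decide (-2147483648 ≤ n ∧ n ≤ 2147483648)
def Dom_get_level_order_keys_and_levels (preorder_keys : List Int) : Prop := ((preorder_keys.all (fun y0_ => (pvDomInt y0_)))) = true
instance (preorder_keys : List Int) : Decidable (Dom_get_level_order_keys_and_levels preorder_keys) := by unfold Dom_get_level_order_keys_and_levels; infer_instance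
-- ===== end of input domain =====

-- B rebuilds the tree by splitting the tail list at the first larger key and walks it
-- level by level; A's global-index recursion + FIFO queue are replaced (objective: alternative).

-- ===== PORT A =====
-- TreeNode: key, level, left, right (None ↦ nil)
inductive TreeA where
  | nil : TreeA
  | node : Int → Int → TreeA → TreeA → TreeA
deriving DecidableEq, Repr

def sizeA : TreeA → Nat
  | .nil => 0
  | .node _ _ l r => 1 + sizeA l + sizeA r

-- the 'for i in range(low, high+1): if pre[i] > root.key: r_child_ind = i; break' loop,
-- ported by hand step for step (pyGetD is exact where pre[i] is in range, which holds on
-- every call A makes on a nonempty list)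
def scanA (pre : List Int) (k high i : Int) : Int :=
  if i > high then -1
  else if k < PySem.List.pyGetD pre i 0 then i
  else scanA pre k high (i + 1)
termination_by (high + 1 - i).toNat

-- build_tree with the global build_tree.pre_index threaded as state (returned second);
-- fuel only makes the recursion total: pre.length + 1 is always enough on the calls A makes
def buildA (pre : List Int) (index low high preIndex : Int) : Nat → TreeA × Int
  | 0 => (.nil, preIndex)
  | fuel + 1 =>
    if low > high then (.nil, preIndex)
    else
      let k := PySem.List.pyGetD pre preIndex 0
      let pI := preIndex + 1
      if low == high then (.node k index .nil .nil, pI)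
      else
        let r0 := scanA pre k high low
        let r := if r0 = -1 then pI + (high - low) else r0
        let L := buildA pre (index + 1) pI (r - 1) pI fuel
        let R := buildA pre (index + 1) r high L.2 fuel
        (.node k index L.1 R.1, R.2)

-- children actually enqueued by the BFS loop
def childrenA (t : TreeA) : List TreeA :=
  match t with
  | .nil => []
  | .node _ _ l r => (if l ≠ .nil then [l] else []) ++ (if r ≠ .nil then [r] else [])

theorem childrenA_size_le (k v : Int) (l r : TreeA) :
    ((childrenA (.node k v l r)).map sizeA).sum ≤ sizeA l + sizeA r ∧
    (childrenA (.node k v l r)).length ≤ 2 := by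
  simp only [childrenA]
  split_ifs <;> simp

-- the 'while not q.empty()' loop; a nil at the head is where Python raises AttributeError
-- (only reachable from the empty input, which Pre_ excludes)
def bfsA (q : List TreeA) : List Int × List Int :=
  match q with
  | [] => ([], [])
  | .nil :: _ => ([], [])
  | .node k lvl l r :: rest =>
    let out := bfsA (rest ++ childrenA (.node k lvl l r))
    (k :: out.1, lvl :: out.2)
termination_by ((q.map sizeA).sum) * 2 + q.length
decreasing_by
  have h := childrenA_size_le k lvl l r
  simp only [List.map_append, List.sum_append, List.length_append,
    List.map_cons, List.sum_cons, List.length_cons, sizeA]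
  omega

def get_level_order_keys_and_levels (preorder_keys : List Int) : List Int × List Int :=
  let b := buildA preorder_keys 0 0 ((preorder_keys.length : Int) - 1) 0 (preorder_keys.length + 1)
  bfsA [b.1]

-- ===== PORT B =====
-- B's tree tuples (key, left, right); None ↦ leaf
inductive TreeB where
  | leaf : TreeB
  | node : Int → TreeB → TreeB → TreeB
deriving DecidableEq, Repr

def sizeB : TreeB → Nat
  | .leaf => 1
  | .node _ l r => 1 + sizeB l + sizeB r

def buildB (seg : List Int) : TreeB :=
  match seg with
  | [] => .leaf
  | x :: rest =>
    let cut := (rest.findIdx? (fun v => x < v)).getD rest.length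
    .node x (buildB (rest.take cut)) (buildB (rest.drop cut))
termination_by seg.length
decreasing_by
  all_goals simp [List.length_take, List.length_drop]

-- '[c for t in frontier for c in (t[1], t[2]) if c]' for one t
def childrenB (t : TreeB) : List TreeB :=
  match t with
  | .leaf => []   -- unreachable: the frontier never holds a leaf
  | .node _ l r => [l, r].filter (fun c => c ≠ .leaf)

def rootB (t : TreeB) : Int :=
  match t with
  | .leaf => 0   -- unreachable
  | .node k _ _ => k

theorem childrenB_size_lt (t : TreeB) : ((childrenB t).map sizeB).sum < sizeB t := by
  cases t with
  | leaf => simp [childrenB, sizeB]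
  | node k l r =>
    simp only [childrenB, sizeB, List.filter_cons, List.filter_nil]
    split_ifs <;> simp <;> omega

theorem flatChildB_le (f : List TreeB) :
    (((f.flatMap childrenB).map sizeB).sum) ≤ ((f.map sizeB).sum) := by
  induction f with
  | nil => simp
  | cons a f ih =>
    have := childrenB_size_lt a
    simp only [List.flatMap_cons, List.map_append, List.sum_append, List.map_cons, List.sum_cons]
    omega

-- the 'while frontier:' loop
def bfsB : List TreeB → Int → List Int × List Int
  | [], _ => ([], [])
  | t :: f, level =>
    let out := bfsB ((t :: f).flatMap childrenB) (level + 1)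
    ((t :: f).map rootB ++ out.1, (t :: f).map (fun _ => level) ++ out.2)
termination_by frontier _ => (frontier.map sizeB).sum
decreasing_by
  have h1 := childrenB_size_lt t
  have h2 := flatChildB_le f
  simp only [List.flatMap_cons, List.map_append, List.sum_append, List.map_cons, List.sum_cons]
  omega

def get_level_order_keys_and_levels_alt (preorder_keys : List Int) : List Int × List Int :=
  let frontier := [buildB preorder_keys].filter (fun t => t ≠ .leaf)
  bfsB frontier 0

-- ===== PRECONDITION & SPEC =====
-- Pre_ excludes only the empty list, on which A raises AttributeError (it enqueues the None root)
def Pre_get_level_order_keys_and_levels (preorder_keys : List Int) : Prop := preorder_keys ≠ []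
instance (preorder_keys : List Int) : Decidable (Pre_get_level_order_keys_and_levels preorder_keys) := by
  unfold Pre_get_level_order_keys_and_levels; infer_instance

def pvWitness_get_level_order_keys_and_levels : List Int := [10, 5, 1, 7, 40, 50]

def Spec_get_level_order_keys_and_levels (preorder_keys : List Int) (out : List Int × List Int) : Prop := out = get_level_order_keys_and_levels_alt preorder_keys
instance (preorder_keys : List Int) (out : List Int × List Int) : Decidable (Spec_get_level_order_keys_and_levels preorder_keys out) := by unfold Spec_get_level_order_keys_and_levels; infer_instance

-- ===== CLAIM (what is proved, stated in full; the proofs are below) =====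
def Claim_equal_get_level_order_keys_and_levels : Prop := ∀ (preorder_keys : List Int), Dom_get_level_order_keys_and_levels preorder_keys → Pre_get_level_order_keys_and_levels preorder_keys → Spec_get_level_order_keys_and_levels preorder_keys (get_level_order_keys_and_levels preorder_keys)

-- ===== LEMMAS AND PROOFS =====

-- B's tree annotated with A's levels
def ann (lvl : Int) : TreeB → TreeA
  | .leaf => .nil
  | .node k l r => .node k lvl (ann (lvl + 1) l) (ann (lvl + 1) r)

def keyA : TreeA → Int
  | .nil => 0
  | .node k _ _ _ => k

def lvlA : TreeA → Int
  | .nil => 0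
  | .node _ v _ _ => v

theorem ann_eq_nil_iff (lvl : Int) (t : TreeB) : ann lvl t = .nil ↔ t = .leaf := by
  cases t <;> simp [ann]

theorem keyA_ann (lvl : Int) (t : TreeB) : keyA (ann lvl t) = rootB t := by
  cases t <;> simp [ann, keyA, rootB]

theorem lvlA_ann (lvl : Int) (t : TreeB) (h : t ≠ .leaf) : lvlA (ann lvl t) = lvl := by
  cases t with
  | leaf => exact absurd rfl h
  | node k l r => simp [ann, lvlA]

theorem childrenA_ann (lvl : Int) (t : TreeB) :
    childrenA (ann lvl t) = (childrenB t).map (ann (lvl + 1)) := by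
  cases t with
  | leaf => simp [ann, childrenA, childrenB]
  | node k l r =>
    simp only [ann, childrenA, childrenB, List.filter_cons, List.filter_nil]
    by_cases hl : l = TreeB.leaf <;> by_cases hr : r = TreeB.leaf <;>
      simp [hl, hr, ann_eq_nil_iff, ann]

theorem sizeB_pos (t : TreeB) : 1 ≤ sizeB t := by
  cases t <;> simp [sizeB] <;> omega

theorem scanA_spec (pre : List Int) (k : Int) :
    ∀ (w : List Int) (i : Int),
      (∀ j : Nat, j < w.length → PySem.List.pyGetD pre (i + j) 0 = w.getD j 0) →
      scanA pre k (i + w.length - 1) i =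
        (match w.findIdx? (fun v => k < v) with
         | some j => i + (j : Int)
         | none => -1) := by
  intro w
  induction w with
  | nil =>
    intro i _
    rw [scanA]
    simp
  | cons x w' ihw =>
    intro i h
    have hx : PySem.List.pyGetD pre i 0 = x := by
      have h0 := h 0 (by simp)
      simpa using h0
    rw [scanA]
    have hle : ¬ i > i + ((x :: w').length : Int) - 1 := by
      simp only [List.length_cons]
      push_cast
      omega
    rw [if_neg hle, hx]
    by_cases hk : k < x
    · rw [if_pos hk]
      simp [List.findIdx?_cons, hk]
    · rw [if_neg hk]
      have ih := ihw (i + 1) (fun j hj => by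
        have hj1 := h (j + 1) (by simpa using Nat.succ_lt_succ hj)
        have : i + ((j : Int) + 1) = (i + 1) + (j : Int) := by ring
        push_cast at hj1 ⊢
        rw [← this]
        simpa using hj1)
      have hh : i + ((x :: w').length : Int) - 1 = (i + 1) + (w'.length : Int) - 1 := by
        simp only [List.length_cons]
        push_cast
        ring
      rw [hh, ih]
      simp only [List.findIdx?_cons, hk, decide_false, Bool.false_eq_true, if_false]
      cases hfi : w'.findIdx? (fun v => k < v) with
      | none => simp
      | some j => simp; push_cast; ring

theorem findIdx?_some_lt_length {p : Int → Bool} :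
    ∀ (l : List Int) (j : Nat), l.findIdx? p = some j → j < l.length := by
  intro l
  induction l with
  | nil => intro j h; simp at h
  | cons a l ih =>
    intro j h
    rw [List.findIdx?_cons] at h
    by_cases hp : p a
    · simp [hp] at h
      simp [List.length_cons]
      omega
    · simp [hp] at h
      obtain ⟨i, hi, rfl⟩ := h
      have := ih i hi
      simp
      omega

theorem buildA_eq (pre : List Int) :
    ∀ (len : Nat) (idx low high : Int) (fuel : Nat),
      0 ≤ low → high = low + len - 1 → low.toNat + len ≤ pre.length → len < fuel →
      buildA pre idx low high low fuel =
        (ann idx (buildB ((pre.drop low.toNat).take len)), low + len) := by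
  intro len
  induction len using Nat.strong_induction_on with
  | _ len IH =>
  intro idx low high fuel h0 hh hlen hfuel
  obtain ⟨f, rfl⟩ : ∃ f, fuel = f + 1 := ⟨fuel - 1, by omega⟩
  subst hh
  cases len with
  | zero =>
    rw [buildA]
    rw [if_pos (by push_cast; omega)]
    simp only [List.take_zero]
    rw [buildB]
    simp [ann]
  | succ m =>
    cases hd : pre.drop low.toNat with
    | nil =>
      exfalso
      have hdl : (pre.drop low.toNat).length = pre.length - low.toNat := by simp
      rw [hd] at hdl
      simp at hdl
      omega
    | cons y tl =>
    have hdl : (pre.drop low.toNat).length = pre.length - low.toNat := by simp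
    rw [hd] at hdl
    have htllen : tl.length = pre.length - low.toNat - 1 := by
      simp at hdl; omega
    set rest := tl.take m with hrest
    have hrestlen : rest.length = m := by
      simp [hrest]; omega
    have hky : PySem.List.pyGetD pre low 0 = y := by
      rw [PySem.List.pyGetD_eq_getElem pre 0 h0 (by omega)]
      have h1 : pre[low.toNat]'(by omega) = (pre.drop low.toNat)[0]'(by rw [hd]; simp) := by
        simp
      rw [h1]
      simp only [hd]
      rfl
    have hwj : ∀ j : Nat, j < m + 1 → (y :: rest)[j]? = pre[low.toNat + j]? := by
      intro j hj
      have h1 : pre[low.toNat + j]? = (y :: tl)[j]? := by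
        rw [← List.getElem?_drop, hd]
      rw [h1]
      cases j with
      | zero => rfl
      | succ j' =>
        show rest[j']? = tl[j']?
        rw [hrest]
        exact List.getElem?_take_of_lt (by omega)
    have hscan := scanA_spec pre y (y :: rest) low (by
      intro j hj
      have hj' : j < m + 1 := by
        simp only [List.length_cons, hrestlen] at hj; omega
      rw [PySem.List.pyGetD_of_nonneg pre 0 (by omega)]
      rw [List.getD_eq_getElem?_getD, List.getD_eq_getElem?_getD]
      have h2 : (low + (j : Int)).toNat = low.toNat + j := by omega
      rw [h2, ← hwj j hj'])
    have hlen2 : (((y :: rest).length : Nat) : Int) = ((m + 1 : Nat) : Int) := by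
      simp [hrestlen]
    rw [hlen2] at hscan
    rw [List.findIdx?_cons] at hscan
    simp only [lt_irrefl, decide_false, Bool.false_eq_true, if_false] at hscan
    -- unfold A and B one step
    simp only [buildA]
    rw [if_neg (by push_cast; omega)]
    rw [hky]
    rw [show List.take (m + 1) (y :: tl) = y :: rest from by simp [List.take_succ_cons, hrest]]
    rw [buildB]
    cases m with
    | zero =>
      rw [if_pos (by simp only [beq_iff_eq]; push_cast; omega)]
      have hrest0 : rest = [] := List.eq_nil_of_length_eq_zero hrestlen
      rw [hrest0]
      simp only [List.findIdx?_nil, Option.getD_none, List.length_nil,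
        List.take_zero, List.take_nil, List.drop_nil]
      rw [buildB]
      rw [Prod.mk.injEq]
      refine ⟨by simp [ann], by push_cast; omega⟩
    | succ m' =>
      rw [if_neg (by simp only [beq_iff_eq]; push_cast; omega)]
      rw [hscan]
      cases hfi : rest.findIdx? (fun v => y < v) with
      | none =>
        simp only [hfi, Option.map_none, Option.getD_none]
        simp only [if_true]
        rw [show low + 1 + (low + ((m' + 1 + 1 : Nat) : Int) - 1 - low) = low + 1 + ((m' + 1 : Nat) : Int) from by push_cast; ring]
        have hL := IH (m' + 1) (by omega) (idx + 1) (low + 1)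
          (low + 1 + ((m' + 1 : Nat) : Int) - 1) f
          (by omega) (by push_cast; ring) (by omega) (by omega)
        rw [hL]
        try dsimp only
        have hR := IH 0 (by omega) (idx + 1)
          (low + 1 + ((m' + 1 : Nat) : Int)) (low + ((m' + 1 + 1 : Nat) : Int) - 1) f
          (by omega) (by push_cast; ring) (by omega) (by omega)
        rw [hR]
        try dsimp only
        simp only [List.take_zero]
        have hw1 : (pre.drop (low + 1).toNat).take (m' + 1) = rest := by
          rw [show (low + 1).toNat = low.toNat + 1 from by omega]
          rw [show low.toNat + 1 = low.toNat + 1 from rfl, ← List.drop_drop, hd]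
          exact hrest.symm
        rw [hw1]
        rw [List.take_of_length_le (by omega), List.drop_eq_nil_of_le (by omega)]
        rw [Prod.mk.injEq]
        refine ⟨by simp [ann], by push_cast; omega⟩
      | some j =>
        have hjlt : j < rest.length := findIdx?_some_lt_length rest j hfi
        simp only [hfi, Option.map_some, Option.getD_some]
        rw [if_neg (show ¬ (low + ((j + 1 : Nat) : Int) = -1) from by push_cast; omega)]
        rw [show low + ((j + 1 : Nat) : Int) = low + 1 + (j : Int) from by push_cast; ring]
        have hL := IH j (by omega) (idx + 1) (low + 1)
          (low + 1 + (j : Int) - 1) f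
          (by omega) (by push_cast; ring) (by omega) (by omega)
        rw [hL]
        try dsimp only
        have hR := IH (m' + 1 - j) (by omega) (idx + 1)
          (low + 1 + (j : Int)) (low + ((m' + 1 + 1 : Nat) : Int) - 1) f
          (by omega) (by omega) (by omega) (by omega)
        rw [hR]
        try dsimp only
        have hw1 : (pre.drop (low + 1).toNat).take j = rest.take j := by
          rw [show (low + 1).toNat = low.toNat + 1 from by omega]
          rw [← List.drop_drop, hd]
          rw [hrest, List.take_take]
          rw [Nat.min_eq_left (by omega)]
          rfl
        rw [hw1]
        have hw2 : (pre.drop (low + 1 + (j : Int)).toNat).take (m' + 1 - j) = rest.drop j := by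
          rw [show (low + 1 + (j : Int)).toNat = low.toNat + 1 + j from by omega]
          rw [show low.toNat + 1 + j = (low.toNat + 1) + j from rfl]
          rw [← List.drop_drop]
          rw [show pre.drop (low.toNat + 1) = tl from by rw [← List.drop_drop, hd]; rfl]
          rw [hrest, List.drop_take]
        rw [hw2]
        rw [Prod.mk.injEq]
        refine ⟨by simp [ann], by push_cast; omega⟩

theorem bfs_rot :
    ∀ (xs ys : List TreeA), (∀ t ∈ xs, t ≠ .nil) →
      bfsA (xs ++ ys) =
        (xs.map keyA ++ (bfsA (ys ++ xs.flatMap childrenA)).1,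
         xs.map lvlA ++ (bfsA (ys ++ xs.flatMap childrenA)).2) := by
  intro xs
  induction xs with
  | nil =>
    intro ys _
    simp
  | cons t xs ih =>
    intro ys h
    have ht := h t List.mem_cons_self
    cases t with
    | nil => exact absurd rfl ht
    | node k v l r =>
      rw [List.cons_append, bfsA]
      have ihh := ih (ys ++ childrenA (.node k v l r))
        (fun u hu => h u (List.mem_cons_of_mem _ hu))
      rw [List.append_assoc] at *
      rw [ihh]
      simp [List.flatMap_cons, List.append_assoc, keyA, lvlA]

theorem bfs_level :
    ∀ (n : Nat) (f : List TreeB) (lvl : Int),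
      (f.map sizeB).sum ≤ n → (∀ t ∈ f, t ≠ .leaf) →
      bfsA (f.map (ann lvl)) = bfsB f lvl := by
  intro n
  induction n with
  | zero =>
    intro f lvl hs hleaf
    cases f with
    | nil => simp only [List.map_nil]; rw [bfsA, bfsB]
    | cons t f' =>
      exfalso
      have := sizeB_pos t
      simp at hs
      omega
  | succ n ihn =>
    intro f lvl hs hleaf
    cases f with
    | nil => simp only [List.map_nil]; rw [bfsA, bfsB]
    | cons t f' =>
      have hnonil : ∀ u ∈ (t :: f').map (ann lvl), u ≠ TreeA.nil := by
        intro u hu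
        obtain ⟨v, hv, rfl⟩ := List.mem_map.mp hu
        simpa [ann_eq_nil_iff] using hleaf v hv
      have hrot := bfs_rot ((t :: f').map (ann lvl)) [] hnonil
      rw [List.append_nil, List.nil_append] at hrot
      rw [hrot]
      -- the three maps
      have hkeys : ((t :: f').map (ann lvl)).map keyA = (t :: f').map rootB := by
        rw [List.map_map]
        exact List.map_congr_left (fun u _ => keyA_ann lvl u)
      have hlvls : ((t :: f').map (ann lvl)).map lvlA = (t :: f').map (fun _ => lvl) := by
        rw [List.map_map]
        exact List.map_congr_left (fun u hu => lvlA_ann lvl u (hleaf u hu))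
      have hch : ((t :: f').map (ann lvl)).flatMap childrenA
          = ((t :: f').flatMap childrenB).map (ann (lvl + 1)) := by
        rw [List.flatMap_map]
        have : (fun u => childrenA (ann lvl u)) = (fun u => (childrenB u).map (ann (lvl + 1))) := by
          funext u
          exact childrenA_ann lvl u
        rw [this]
        rw [← List.map_flatMap]
      have hnext_le : (((t :: f').flatMap childrenB).map sizeB).sum ≤ n := by
        have h1 := childrenB_size_lt t
        have h2 := flatChildB_le f'
        simp only [List.flatMap_cons, List.map_append, List.sum_append,
          List.map_cons, List.sum_cons] at *
        omega
      have hnext_noleaf : ∀ u ∈ (t :: f').flatMap childrenB, u ≠ TreeB.leaf := by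
        intro u hu
        obtain ⟨v, _, hv2⟩ := List.mem_flatMap.mp hu
        cases v with
        | leaf => simp [childrenB] at hv2
        | node k l r =>
          simp only [childrenB, List.mem_filter] at hv2
          simpa using hv2.2
      have hihn := ihn ((t :: f').flatMap childrenB) (lvl + 1) hnext_le hnext_noleaf
      rw [hch, hihn]
      rw [bfsB]
      rw [hkeys, hlvls]

-- ===== VERDICT (by name: the statement is the Claim_ definition above) =====
theorem get_level_order_keys_and_levels_spec : Claim_equal_get_level_order_keys_and_levels := by
  intro pre hdom hpre
  unfold Spec_get_level_order_keys_and_levels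
  unfold get_level_order_keys_and_levels get_level_order_keys_and_levels_alt
  have hb := buildA_eq pre pre.length 0 0 ((pre.length : Int) - 1) (pre.length + 1)
    le_rfl (by push_cast; ring) (by simp) (by omega)
  simp only [Int.toNat_zero, List.drop_zero, List.take_length, zero_add] at hb
  rw [hb]
  have hne : buildB pre ≠ TreeB.leaf := by
    cases pre with
    | nil => exact absurd rfl hpre
    | cons a l => rw [buildB]; simp
  have hfil : [buildB pre].filter (fun t => t ≠ TreeB.leaf) = [buildB pre] := by
    simp [hne]
  rw [hfil]
  have := bfs_level (sizeB (buildB pre)) [buildB pre] 0 (by simp)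
    (by intro u hu; simp at hu; rw [hu]; exact hne)
  simpa using this
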